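-- pv_equiv track=rewrite | github.com/pypi-data/pypi-mirror-386 | packages/noveler/noveler-3.0.0.tar.gz/noveler-3.0.0/scripts/hooks/offline_basic_checks.py | _fix_trailing_whitespace
-- ===== SOURCE A (Python) =====
-- def _fix_trailing_whitespace(lines: list[str]) -> tuple[list[str], bool]:
--     """Strip trailing whitespace while preserving original newline symbols."""
--
--     fixed_lines: list[str] = []
--     modified = False
--
--     for line in lines:
--         if line.endswith(("\n", "\r")):
--             body = line.rstrip("\r\n")
--             terminator = line[len(body) :]
--         else:
--             body, terminator = line, ""
--
--         trimmed = body.rstrip(" \t")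
--         if trimmed != body:
--             modified = True
--         fixed_lines.append(trimmed + terminator)
--
--     return fixed_lines, modified
-- ===== SOURCE B (Python) =====
-- def _fix_line(line):
--     # Single forward pass: commit characters as soon as they are known to stay,
--     # keeping two pending buffers — a run of spaces/tabs and a run of '\r'/'\n'.
--     # At end of line the pending spaces/tabs are discarded (they are trailing
--     # whitespace before the terminator) and the pending '\r'/'\n' run is kept.
--     out = []
--     ws = []  # pending spaces/tabs
--     nl = []  # pending '\r'/'\n' characters
--     for c in line:
--         if c == " " or c == "\t":
--             if nl:
--                 out += ws + nl
--                 ws, nl = [c], []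
--             else:
--                 ws.append(c)
--         elif c == "\r" or c == "\n":
--             nl.append(c)
--         else:
--             out += ws + nl + [c]
--             ws, nl = [], []
--     return "".join(out + nl)
--
--
-- def _fix_trailing_whitespace(lines):
--     fixed_lines = [_fix_line(line) for line in lines]
--     return fixed_lines, fixed_lines != lines
-- ===== Notes on version B (the rewrite author's own statement) =====
-- stated objective: alternative
-- what changed: B processes each line in one forward pass over its characters with two pending buffers (a run of spaces/tabs and a run of \r/\n), committing characters once a later non-whitespace character proves they stay and discarding the pending space run at end of line, instead of A's endswith test plus two rstrip splittings; the modified flag is derived afterwards by comparing the output list with the input instead of threading a boolean accumulator.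
import Mathlib
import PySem

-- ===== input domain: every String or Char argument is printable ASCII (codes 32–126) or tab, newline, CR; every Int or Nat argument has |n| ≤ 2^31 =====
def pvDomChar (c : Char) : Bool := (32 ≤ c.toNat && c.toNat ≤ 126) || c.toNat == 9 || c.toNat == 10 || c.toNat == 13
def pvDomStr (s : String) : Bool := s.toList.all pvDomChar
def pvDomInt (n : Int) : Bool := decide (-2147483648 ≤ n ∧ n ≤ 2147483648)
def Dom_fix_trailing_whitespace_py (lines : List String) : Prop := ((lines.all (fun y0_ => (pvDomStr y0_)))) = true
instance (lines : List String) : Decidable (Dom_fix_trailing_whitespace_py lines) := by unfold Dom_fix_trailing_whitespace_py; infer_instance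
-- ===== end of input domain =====

-- B rebuilds each line in one forward pass over its characters with two pending buffers
-- (a run of spaces/tabs and a run of '\r'/'\n'), dropping the pending space run at end of
-- line, instead of A's endswith test plus two rstrip splittings; the modified flag is a
-- post-hoc list comparison instead of a threaded boolean (objective: alternative, same cost).

-- ===== PORT A =====
-- Python str.rstrip(chars): drop the trailing characters that belong to chars (exact).
def pyRstripChars (s : List Char) (chars : List Char) : List Char :=
  (s.reverse.dropWhile (fun c => c ∈ chars)).reverse

def fix_trailing_whitespace_py (lines : List String) : List String × Bool :=
  lines.foldl
    (fun acc line =>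
      let bt :=
        if PySem.Str.endswith line "\n" || PySem.Str.endswith line "\r" then
          let body := String.ofList (pyRstripChars line.toList ['\r', '\n'])
          -- line[len(body):] with 0 ≤ len(body) ≤ len(line): exactly List.drop
          (body, String.ofList (line.toList.drop body.toList.length))
        else (line, "")
      let trimmed := String.ofList (pyRstripChars bt.1.toList [' ', '\t'])
      (acc.1 ++ [trimmed ++ bt.2], if trimmed ≠ bt.1 then true else acc.2))
    ([], false)

-- ===== PORT B =====
-- Source B's loop body: state (out, ws, nl) = committed chars, pending spaces/tabs, pending \r\n run.
def pvStep (st : List Char × List Char × List Char) (c : Char) :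
    List Char × List Char × List Char :=
  if c = ' ' ∨ c = '\t' then
    if st.2.2 ≠ [] then (st.1 ++ st.2.1 ++ st.2.2, [c], [])
    else (st.1, st.2.1 ++ [c], [])
  else if c = '\r' ∨ c = '\n' then (st.1, st.2.1, st.2.2 ++ [c])
  else (st.1 ++ st.2.1 ++ st.2.2 ++ [c], [], [])

def pvFixLine (line : String) : String :=
  let st := line.toList.foldl pvStep ([], [], [])
  String.ofList (st.1 ++ st.2.2)

def fix_trailing_whitespace_py_alt (lines : List String) : List String × Bool :=
  let fixed := lines.map pvFixLine
  (fixed, decide (fixed ≠ lines))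

-- ===== PRECONDITION & SPEC =====
def Spec_fix_trailing_whitespace_py (lines : List String) (out : List String × Bool) : Prop := out = fix_trailing_whitespace_py_alt lines
instance (lines : List String) (out : List String × Bool) : Decidable (Spec_fix_trailing_whitespace_py lines out) := by unfold Spec_fix_trailing_whitespace_py; infer_instance

-- ===== CLAIM (what is proved, stated in full; the proofs are below) =====
def Claim_equal_fix_trailing_whitespace_py : Prop := ∀ (lines : List String), Dom_fix_trailing_whitespace_py lines → Spec_fix_trailing_whitespace_py lines (fix_trailing_whitespace_py lines)

-- ===== LEMMAS AND PROOFS =====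

-- invariant of B's forward pass over the characters processed so far
def pvInv (s : List Char) (st : List Char × List Char × List Char) : Prop :=
  s = st.1 ++ st.2.1 ++ st.2.2 ∧
  (∀ c ∈ st.2.1, c = ' ' ∨ c = '\t') ∧
  (∀ c ∈ st.2.2, c = '\r' ∨ c = '\n') ∧
  (∀ c, st.1.getLast? = some c → ¬(c = ' ' ∨ c = '\t')) ∧
  (st.2.1 = [] → ∀ c, st.1.getLast? = some c → ¬(c = '\r' ∨ c = '\n'))

theorem pvInv_foldl (s : List Char) : pvInv s (s.foldl pvStep ([], [], [])) := by
  induction s using List.reverseRecOn with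
  | nil => refine ⟨rfl, ?_, ?_, ?_, ?_⟩ <;> simp
  | append_singleton s c ih =>
    rw [List.foldl_append, List.foldl_cons, List.foldl_nil]
    obtain ⟨hdec, hws, hnl, hout, hout2⟩ := ih
    set st := s.foldl pvStep ([], [], []) with hst
    unfold pvStep
    by_cases h1 : c = ' ' ∨ c = '\t'
    · rw [if_pos h1]
      by_cases h2 : st.2.2 ≠ []
      · rw [if_pos h2]
        refine ⟨by simp [hdec], by simpa using h1, by simp, ?_, by simp⟩
        · intro d hd
          have hd' : (st.1 ++ st.2.1 ++ st.2.2).getLast? = some d := hd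
          rw [List.getLast?_append_of_ne_nil _ h2] at hd'
          have := hnl _ (List.mem_of_getLast? hd')
          rcases this with h | h <;> simp [h]
      · rw [if_neg h2]
        have h2' : st.2.2 = [] := by simpa using h2
        refine ⟨by simp [hdec, h2'], ?_, by simp [h2'], hout, by simp⟩
        · intro d hd
          rcases List.mem_append.mp hd with h | h
          · exact hws _ h
          · rcases List.mem_singleton.mp h with rfl; exact h1
    · rw [if_neg h1]
      by_cases h3 : c = '\r' ∨ c = '\n'
      · rw [if_pos h3]
        refine ⟨by simp [hdec], hws, ?_, hout, hout2⟩
        · intro d hd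
          rcases List.mem_append.mp hd with h | h
          · exact hnl _ h
          · rcases List.mem_singleton.mp h with rfl; exact h3
      · rw [if_neg h3]
        refine ⟨by simp [hdec], by simp, by simp, ?_, ?_⟩
        · intro d hd
          have hd' : ((st.1 ++ st.2.1 ++ st.2.2) ++ [c]).getLast? = some d := by
            rw [show (st.1 ++ st.2.1 ++ st.2.2) ++ [c] = st.1 ++ st.2.1 ++ st.2.2 ++ [c] by simp]
            exact hd
          rw [List.getLast?_concat] at hd'
          cases hd'; exact h1
        · intro _ d hd
          have hd' : ((st.1 ++ st.2.1 ++ st.2.2) ++ [c]).getLast? = some d := by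
            rw [show (st.1 ++ st.2.1 ++ st.2.2) ++ [c] = st.1 ++ st.2.1 ++ st.2.2 ++ [c] by simp]
            exact hd
          rw [List.getLast?_concat] at hd'
          cases hd'; exact h3

-- rstrip of s ++ t where t is all strippable and s does not end in a strippable char
theorem pvRstrip_append (s t cs : List Char)
    (h1 : ∀ c ∈ t, c ∈ cs) (h2 : ∀ c, s.getLast? = some c → c ∉ cs) :
    pyRstripChars (s ++ t) cs = s := by
  unfold pyRstripChars
  rw [List.reverse_append, List.dropWhile_append]
  have ht : t.reverse.dropWhile (fun c => c ∈ cs) = [] := by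
    rw [List.dropWhile_eq_nil_iff]
    intro c hc
    simpa using h1 c (List.mem_reverse.mp hc)
  rw [ht]
  simp only [List.isEmpty_nil, if_true]
  have hs : s.reverse.dropWhile (fun c => c ∈ cs) = s.reverse := by
    cases hrev : s.reverse with
    | nil => simp
    | cons x xs =>
      have hx : s.getLast? = some x := by
        rw [← List.head?_reverse, hrev]; rfl
      rw [List.dropWhile_cons, if_neg (by simpa using h2 x hx)]
  rw [hs, List.reverse_reverse]

theorem ofList_append (a b : List Char) :
    String.ofList (a ++ b) = String.ofList a ++ String.ofList b := by
  apply String.toList_injective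
  simp [String.toList_append]

-- per-line: A's loop body on one line computes B's pvFixLine, and the flag conditions agree
theorem perLine (line : String) :
    (let bt :=
        if PySem.Str.endswith line "\n" || PySem.Str.endswith line "\r" then
          let body := String.ofList (pyRstripChars line.toList ['\r', '\n'])
          (body, String.ofList (line.toList.drop body.toList.length))
        else (line, "")
      let trimmed := String.ofList (pyRstripChars bt.1.toList [' ', '\t'])
      (trimmed ++ bt.2, decide (trimmed ≠ bt.1))) =
    (pvFixLine line, decide (pvFixLine line ≠ line)) := by
  obtain ⟨hdec, hws, hnl, hout, hout2⟩ := pvInv_foldl line.toList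
  set st := line.toList.foldl pvStep ([], [], []) with hst
  have hfix : pvFixLine line = String.ofList (st.1 ++ st.2.2) := rfl
  clear hst
  clear_value st
  have hlastws : ∀ c, (st.1 ++ st.2.1).getLast? = some c → c ∉ (['\r', '\n'] : List Char) := by
    intro c hc hmem
    have hmem' : c = '\r' ∨ c = '\n' := by simpa using hmem
    cases hws' : st.2.1 with
    | nil =>
      rw [hws', List.append_nil] at hc
      exact hout2 hws' c hc hmem'
    | cons x xs =>
      rw [hws', List.getLast?_append_of_ne_nil _ (by simp)] at hc
      have := hws c (by rw [hws']; exact List.mem_of_getLast? hc)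
      rcases this with h | h <;> rcases hmem' with h' | h' <;>
        (rw [h] at h'; exact absurd h' (by decide))
  have hlastout : ∀ c, st.1.getLast? = some c → c ∉ ([' ', '\t'] : List Char) := by
    intro c hc hmem
    exact hout c hc (by simpa using hmem)
  by_cases hend : (PySem.Str.endswith line "\n" || PySem.Str.endswith line "\r") = true
  · -- terminator branch: the \r\n buffer is nonempty
    have hnlne : st.2.2 ≠ [] := by
      intro hnil
      have hline : line.toList = st.1 ++ st.2.1 := by rw [hdec, hnil, List.append_nil]
      rcases Bool.or_eq_true _ _ |>.mp hend with h | h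
      · have hsuf : ['\n'] <:+ st.1 ++ st.2.1 := by
          rw [← hline, show (['\n'] : List Char) = ("\n" : String).toList by decide,
            ← PySem.Chars.endswith_iff, ← PySem.Str.endswith_eq]
          exact h
        obtain ⟨pre, hpre⟩ := hsuf
        have hlast : (st.1 ++ st.2.1).getLast? = some '\n' := by
          rw [← hpre, List.getLast?_concat]
        exact hlastws '\n' hlast (by simp)
      · have hsuf : ['\r'] <:+ st.1 ++ st.2.1 := by
          rw [← hline, show (['\r'] : List Char) = ("\r" : String).toList by decide,
            ← PySem.Chars.endswith_iff, ← PySem.Str.endswith_eq]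
          exact h
        obtain ⟨pre, hpre⟩ := hsuf
        have hlast : (st.1 ++ st.2.1).getLast? = some '\r' := by
          rw [← hpre, List.getLast?_concat]
        exact hlastws '\r' hlast (by simp)
    simp only [hend, if_true]
    have hbody : pyRstripChars line.toList ['\r', '\n'] = st.1 ++ st.2.1 := by
      rw [hdec]
      exact pvRstrip_append (st.1 ++ st.2.1) st.2.2 _
        (by intro c hc; rcases hnl c hc with h | h <;> simp [h]) hlastws
    have hterm : line.toList.drop (String.ofList (pyRstripChars line.toList ['\r', '\n'])).toList.length = st.2.2 := by
      rw [hbody, String.toList_ofList, hdec, List.drop_left]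
    have htrim : pyRstripChars (String.ofList (pyRstripChars line.toList ['\r', '\n'])).toList [' ', '\t'] = st.1 := by
      rw [hbody, String.toList_ofList]
      exact pvRstrip_append st.1 st.2.1 _
        (by intro c hc; rcases hws c hc with h | h <;> simp [h]) hlastout
    rw [htrim, hterm, hbody]
    rw [Prod.mk.injEq]
    have hlineeq : line = String.ofList (st.1 ++ st.2.1 ++ st.2.2) := by
      apply String.toList_injective; rw [String.toList_ofList]; exact hdec
    constructor
    · rw [hfix, ofList_append]
    · rw [decide_eq_decide, hfix, hlineeq]
      have e1 : (String.ofList st.1 ≠ String.ofList (st.1 ++ st.2.1)) ↔ st.2.1 ≠ [] := by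
        constructor
        · intro h h0; exact h (by simp [h0])
        · intro h h0
          apply h
          have h0' := congrArg String.toList h0
          simp only [String.toList_ofList] at h0'
          exact List.self_eq_append_right.mp h0'
      have e2 : (String.ofList (st.1 ++ st.2.2) ≠ String.ofList (st.1 ++ st.2.1 ++ st.2.2)) ↔ st.2.1 ≠ [] := by
        constructor
        · intro h h0; exact h (by simp [h0])
        · intro h h0
          apply h
          have h0' := congrArg String.toList h0
          simp only [String.toList_ofList, List.append_assoc] at h0'
          exact List.self_eq_append_left.mp (List.append_cancel_left h0')
      rw [e1, e2]
  · -- no-terminator branch: the \r\n buffer is empty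
    have hnl0 : st.2.2 = [] := by
      by_contra hne
      have hc : st.2.2.getLast? = some (st.2.2.getLast hne) := List.getLast?_eq_some_getLast hne
      set c := st.2.2.getLast hne with hcdef
      have hsplit : st.2.2.dropLast ++ [c] = st.2.2 := List.dropLast_concat_getLast hne
      have hsuf : [c] <:+ line.toList :=
        ⟨st.1 ++ st.2.1 ++ st.2.2.dropLast, by rw [hdec, ← hsplit]; simp⟩
      have hcmem : c = '\r' ∨ c = '\n' := hnl c (List.getLast_mem hne)
      apply hend
      rcases hcmem with h | h
      · have : PySem.Str.endswith line "\r" = true := by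
          rw [PySem.Str.endswith_eq, PySem.Chars.endswith_iff,
            show ("\r" : String).toList = ['\r'] by decide, ← h]
          exact hsuf
        rw [this, Bool.or_true]
      · have : PySem.Str.endswith line "\n" = true := by
          rw [PySem.Str.endswith_eq, PySem.Chars.endswith_iff,
            show ("\n" : String).toList = ['\n'] by decide, ← h]
          exact hsuf
        rw [this, Bool.true_or]
    simp only [hend]
    simp only [Bool.false_eq_true, if_false]
    have hline : line.toList = st.1 ++ st.2.1 := by rw [hdec, hnl0, List.append_nil]
    have htrim : pyRstripChars line.toList [' ', '\t'] = st.1 := by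
      rw [hline]
      exact pvRstrip_append st.1 st.2.1 _
        (by intro c hc; rcases hws c hc with h | h <;> simp [h]) hlastout
    have hfix' : pvFixLine line = String.ofList st.1 := by
      rw [hfix, hnl0, List.append_nil]
    simp only [htrim]
    rw [Prod.mk.injEq]
    constructor
    · rw [hfix']; apply String.toList_injective; simp [String.toList_append]
    · rw [hfix']

-- A's loop body rewritten through perLine
theorem stepA_eq (acc : List String × Bool) (line : String) :
    (let bt :=
        if PySem.Str.endswith line "\n" || PySem.Str.endswith line "\r" then
          let body := String.ofList (pyRstripChars line.toList ['\r', '\n'])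
          (body, String.ofList (line.toList.drop body.toList.length))
        else (line, "")
      let trimmed := String.ofList (pyRstripChars bt.1.toList [' ', '\t'])
      (acc.1 ++ [trimmed ++ bt.2], if trimmed ≠ bt.1 then true else acc.2)) =
    (acc.1 ++ [pvFixLine line], acc.2 || decide (pvFixLine line ≠ line)) := by
  have h := perLine line
  simp only at h ⊢
  have h1 := congrArg Prod.fst h
  have h2 := congrArg Prod.snd h
  simp only at h1 h2
  rw [h1, ← h2]
  by_cases hc :
      String.ofList (pyRstripChars
        (if PySem.Str.endswith line "\n" || PySem.Str.endswith line "\r" then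
          (String.ofList (pyRstripChars line.toList ['\r', '\n']),
            String.ofList (line.toList.drop
              (String.ofList (pyRstripChars line.toList ['\r', '\n'])).toList.length))
        else (line, "")).1.toList [' ', '\t']) =
      (if PySem.Str.endswith line "\n" || PySem.Str.endswith line "\r" then
          (String.ofList (pyRstripChars line.toList ['\r', '\n']),
            String.ofList (line.toList.drop
              (String.ofList (pyRstripChars line.toList ['\r', '\n'])).toList.length))
        else (line, "")).1 <;>
    simp [hc, Bool.or_comm]

theorem fold_inv (step : List String × Bool → String → List String × Bool)
    (hstep : ∀ acc line, step acc line =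
      (acc.1 ++ [pvFixLine line], acc.2 || decide (pvFixLine line ≠ line))) :
    ∀ (ls : List String) (acc : List String) (b : Bool),
      ls.foldl step (acc, b) =
        (acc ++ ls.map pvFixLine, b || ls.any (fun l => decide (pvFixLine l ≠ l))) := by
  intro ls
  induction ls with
  | nil => intro acc b; simp
  | cons x xs ih =>
    intro acc b
    simp only [List.foldl_cons, hstep, List.map_cons, List.any_cons]
    rw [ih]
    simp [Bool.or_assoc]

theorem map_ne_eq_any (f : String → String) :
    ∀ (ls : List String),
      decide (ls.map f ≠ ls) = ls.any (fun l => decide (f l ≠ l)) := by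
  intro ls
  induction ls with
  | nil => simp
  | cons x xs ih =>
    simp only [List.map_cons, List.any_cons, ← ih]
    by_cases h1 : f x = x <;> by_cases h2 : xs.map f = xs <;> simp [h1, h2]

-- ===== VERDICT (by name: the statement is the Claim_ definition above) =====
theorem fix_trailing_whitespace_py_spec : Claim_equal_fix_trailing_whitespace_py := by
  intro lines _
  unfold Spec_fix_trailing_whitespace_py fix_trailing_whitespace_py fix_trailing_whitespace_py_alt
  rw [fold_inv _ (fun acc line => stepA_eq acc line) lines [] false]
  simp only [List.nil_append, Bool.false_or]
  rw [map_ne_eq_any pvFixLine lines]
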